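-- pv_equiv track=rewrite | github.com/kimtks456/algorithm | Baekjun_Online_Judge/1018_체스판_다시_칠하기.py | find_minimum_coloring
-- ===== SOURCE A (Python) =====
-- def find_minimum_coloring(maps):
--     min_cnt1 = 64
--     min_cnt2 = 64
--     cnt = 0
--
--     for idx, row in enumerate(maps):
--         cnt += count_different_space(idx, row, 'BWBWBWBW', 'WBWBWBWB')
--     if cnt < min_cnt1:
--         min_cnt1 = cnt
--
--     cnt = 0
--     for idx, row in enumerate(maps):
--         cnt += count_different_space(idx, row, 'WBWBWBWB', 'BWBWBWBW')
--     if cnt < min_cnt2: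
--         min_cnt2 = cnt
--
--     return min(min_cnt1, min_cnt2)
--
-- def count_different_space(idx, row, first, second):
--     cnt = 0
--     if idx % 2 == 0:
--         for i in range(8):
--             if row[i] != first[i]:
--                 cnt += 1
--     else:
--         for i in range(8):
--             if row[i] != second[i]:
--                 cnt += 1
--     return cnt
-- ===== SOURCE B (Python) =====
-- def find_minimum_coloring(maps):
--     tally = {}
--     for idx, row in enumerate(maps):
--         for i in range(8):
--             key = ((idx + i) % 2, row[i])
--             tally[key] = tally.get(key, 0) + 1
--     total = 8 * len(maps)
--     cnt1 = total - tally.get((0, 'B'), 0) - tally.get((1, 'W'), 0)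
--     cnt2 = total - tally.get((0, 'W'), 0) - tally.get((1, 'B'), 0)
--     return min(cnt1, cnt2, 64)
-- ===== Notes on version B (the rewrite author's own statement) =====
-- stated objective: alternative
-- what changed: B replaces A's two mismatch-counting passes (helper with precomputed pattern strings and a per-row parity branch) by a single tally pass that builds a histogram keyed by (diagonal parity, cell character), and then computes both recolor counts arithmetically as total cells minus the two correctly-coloured histogram entries; the 64 cap (A's min_cnt initialisation) becomes an explicit min(cnt1, cnt2, 64).
import Mathlib
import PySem

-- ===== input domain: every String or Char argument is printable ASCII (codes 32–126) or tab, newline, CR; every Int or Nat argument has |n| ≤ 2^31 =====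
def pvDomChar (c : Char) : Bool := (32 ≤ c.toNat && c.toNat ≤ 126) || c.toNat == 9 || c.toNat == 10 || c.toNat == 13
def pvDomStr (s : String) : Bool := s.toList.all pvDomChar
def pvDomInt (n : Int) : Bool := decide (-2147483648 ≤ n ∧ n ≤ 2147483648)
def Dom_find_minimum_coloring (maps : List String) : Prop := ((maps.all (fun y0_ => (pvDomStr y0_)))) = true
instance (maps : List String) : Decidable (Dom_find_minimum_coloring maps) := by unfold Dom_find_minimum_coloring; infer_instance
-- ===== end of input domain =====

-- B replaces A's two mismatch-counting passes by one histogram pass keyed by (diagonal parity, char)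
-- plus complement arithmetic from four lookups — objective: alternative (same cost, different structure).


-- ===== PORT A =====
def count_different_space (idx : Int) (row first second : String) : Int :=
  if PySem.Int.mod idx 2 == 0 then
    (PySem.List.pyRange 0 8 1).foldl
      (fun cnt i => if PySem.Str.pyGet? row i != PySem.Str.pyGet? first i then cnt + 1 else cnt) 0
  else
    (PySem.List.pyRange 0 8 1).foldl
      (fun cnt i => if PySem.Str.pyGet? row i != PySem.Str.pyGet? second i then cnt + 1 else cnt) 0

def find_minimum_coloring (maps : List String) : Int :=
  let min_cnt1 : Int := 64
  let min_cnt2 : Int := 64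
  let cnt1 := (PySem.List.enumerate maps).foldl
    (fun cnt p => cnt + count_different_space p.1 p.2 "BWBWBWBW" "WBWBWBWB") 0
  let min_cnt1 := if cnt1 < min_cnt1 then cnt1 else min_cnt1
  let cnt2 := (PySem.List.enumerate maps).foldl
    (fun cnt p => cnt + count_different_space p.1 p.2 "WBWBWBWB" "BWBWBWBW") 0
  let min_cnt2 := if cnt2 < min_cnt2 then cnt2 else min_cnt2
  min min_cnt1 min_cnt2

-- ===== PORT B =====
-- key (idx+i)%2, row[i]; row[i] ported as pyGet? (none = IndexError, excluded by Pre_)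
def pvKey (p : Int × String) (i : Int) : Int × Option Char :=
  (PySem.Int.mod (p.1 + i) 2, PySem.Str.pyGet? p.2 i)

def find_minimum_coloring_alt (maps : List String) : Int :=
  let tally : PySem.Dict (Int × Option Char) Int :=
    (PySem.List.enumerate maps).foldl
      (fun tally p =>
        (PySem.List.pyRange 0 8 1).foldl
          (fun tally i =>
            let key := pvKey p i
            tally.insert key (tally.getD key 0 + 1)) tally)
      PySem.Dict.empty
  let total : Int := 8 * (maps.length : Int)
  let cnt1 := total - tally.getD (0, some 'B') 0 - tally.getD (1, some 'W') 0
  let cnt2 := total - tally.getD (0, some 'W') 0 - tally.getD (1, some 'B') 0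
  min cnt1 (min cnt2 64)

-- ===== PRECONDITION & SPEC =====
-- Pre_ excludes exactly the inputs where Python A raises IndexError: a row shorter than 8 characters.
def Pre_find_minimum_coloring (maps : List String) : Prop :=
  ∀ r ∈ maps, 8 ≤ r.toList.length
instance (maps : List String) : Decidable (Pre_find_minimum_coloring maps) := by
  unfold Pre_find_minimum_coloring; infer_instance
def pvWitness_find_minimum_coloring : List String :=
  ["BWBWBWBW", "WBWBWBWB", "BBBBBBBB", "WWWWWWWW", "BWBWBWBW", "WBWBWBWB", "BWBWBWBW", "Wx.WBWBW"]

def Spec_find_minimum_coloring (maps : List String) (out : Int) : Prop := out = find_minimum_coloring_alt maps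
instance (maps : List String) (out : Int) : Decidable (Spec_find_minimum_coloring maps out) := by unfold Spec_find_minimum_coloring; infer_instance

-- ===== CLAIM (what is proved, stated in full; the proofs are below) =====
def Claim_equal_find_minimum_coloring : Prop := ∀ (maps : List String), Dom_find_minimum_coloring maps → Pre_find_minimum_coloring maps → Spec_find_minimum_coloring maps (find_minimum_coloring maps)

-- ===== LEMMAS AND PROOFS =====

-- A's per-cell mismatch predicates for the two colorings, written over the key.
def mm1 (k : Int × Option Char) : Bool := !(k == ((0 : Int), some 'B')) && !(k == ((1 : Int), some 'W'))
def mm2 (k : Int × Option Char) : Bool := !(k == ((0 : Int), some 'W')) && !(k == ((1 : Int), some 'B'))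

-- the flat list of all cell keys
def keyList (maps : List String) : List (Int × Option Char) :=
  (PySem.List.enumerate maps).flatMap (fun p => (PySem.List.pyRange 0 8 1).map (pvKey p))

-- pattern lookups on 0 ≤ i < 8
lemma getBW (i : Int) (h0 : 0 ≤ i) (h8 : i < 8) :
    PySem.Str.pyGet? "BWBWBWBW" i = some (if i % 2 == 0 then 'B' else 'W') := by
  interval_cases i <;> decide

lemma getWB (i : Int) (h0 : 0 ≤ i) (h8 : i < 8) :
    PySem.Str.pyGet? "WBWBWBWB" i = some (if i % 2 == 0 then 'W' else 'B') := by
  interval_cases i <;> decide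

-- per row: A's helper counts the cells whose key mismatches coloring 1
lemma countA1_eq (idx : Int) (row : String) :
    count_different_space idx row "BWBWBWBW" "WBWBWBWB"
      = ((PySem.List.pyRange 0 8 1).countP (fun i => mm1 (pvKey (idx, row) i)) : Int) := by
  unfold count_different_space
  simp only [PySem.Int.mod_eq_emod_of_pos (by norm_num : (0:Int) < 2)]
  rcases Int.emod_two_eq idx with h | h
  · rw [if_pos (by simp [h]), PySem.List.foldl_count_if, zero_add]
    congr 1; apply List.countP_congr; intro i hi
    rcases PySem.List.mem_pyRange_one.mp hi with ⟨h0, h8⟩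
    rw [getBW i h0 h8]
    unfold mm1 pvKey
    simp only [PySem.Int.mod_eq_emod_of_pos (by norm_num : (0:Int) < 2)]
    rcases Int.emod_two_eq i with h2 | h2
    · have h3 : (idx + i) % 2 = 0 := by omega
      simp [h2, h3]
    · have h3 : (idx + i) % 2 = 1 := by omega
      simp [h2, h3]
  · rw [if_neg (by simp [h]), PySem.List.foldl_count_if, zero_add]
    congr 1; apply List.countP_congr; intro i hi
    rcases PySem.List.mem_pyRange_one.mp hi with ⟨h0, h8⟩
    rw [getWB i h0 h8]
    unfold mm1 pvKey
    simp only [PySem.Int.mod_eq_emod_of_pos (by norm_num : (0:Int) < 2)]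
    rcases Int.emod_two_eq i with h2 | h2
    · have h3 : (idx + i) % 2 = 1 := by omega
      simp [h2, h3]
    · have h3 : (idx + i) % 2 = 0 := by omega
      simp [h2, h3]

lemma countA2_eq (idx : Int) (row : String) :
    count_different_space idx row "WBWBWBWB" "BWBWBWBW"
      = ((PySem.List.pyRange 0 8 1).countP (fun i => mm2 (pvKey (idx, row) i)) : Int) := by
  unfold count_different_space
  simp only [PySem.Int.mod_eq_emod_of_pos (by norm_num : (0:Int) < 2)]
  rcases Int.emod_two_eq idx with h | h
  · rw [if_pos (by simp [h]), PySem.List.foldl_count_if, zero_add]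
    congr 1; apply List.countP_congr; intro i hi
    rcases PySem.List.mem_pyRange_one.mp hi with ⟨h0, h8⟩
    rw [getWB i h0 h8]
    unfold mm2 pvKey
    simp only [PySem.Int.mod_eq_emod_of_pos (by norm_num : (0:Int) < 2)]
    rcases Int.emod_two_eq i with h2 | h2
    · have h3 : (idx + i) % 2 = 0 := by omega
      simp [h2, h3]
    · have h3 : (idx + i) % 2 = 1 := by omega
      simp [h2, h3]
  · rw [if_neg (by simp [h]), PySem.List.foldl_count_if, zero_add]
    congr 1; apply List.countP_congr; intro i hi
    rcases PySem.List.mem_pyRange_one.mp hi with ⟨h0, h8⟩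
    rw [getBW i h0 h8]
    unfold mm2 pvKey
    simp only [PySem.Int.mod_eq_emod_of_pos (by norm_num : (0:Int) < 2)]
    rcases Int.emod_two_eq i with h2 | h2
    · have h3 : (idx + i) % 2 = 1 := by omega
      simp [h2, h3]
    · have h3 : (idx + i) % 2 = 0 := by omega
      simp [h2, h3]

-- A's accumulation equals countP over the flat key list
lemma foldA_eq (maps : List String) (P : (Int × Option Char) → Bool)
    (f : Int × String → Int)
    (hf : ∀ p, f p = ((PySem.List.pyRange 0 8 1).countP (fun i => P (pvKey p i)) : Int)) :
    (PySem.List.enumerate maps).foldl (fun cnt p => cnt + f p) 0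
      = ((keyList maps).countP P : Int) := by
  unfold keyList
  generalize PySem.List.enumerate maps = l
  induction l with
  | nil => simp
  | cons x xs ih =>
    rw [List.flatMap_cons, List.countP_append, List.foldl_cons]
    have shift : ∀ (a : Int) (l : List (Int × String)),
        l.foldl (fun cnt p => cnt + f p) a = a + l.foldl (fun cnt p => cnt + f p) 0 := by
      intro a l
      induction l generalizing a with
      | nil => simp
      | cons y ys ihy => simp only [List.foldl_cons]; rw [ihy (a + f y), ihy (0 + f y)]; ring
    rw [shift (0 + f x) xs, ih, hf x, List.countP_map]
    simp only [Function.comp_def]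
    push_cast; ring

-- nested insert-fold flattened to a fold over the flat key list
lemma tally_eq (maps : List String) :
    (PySem.List.enumerate maps).foldl
      (fun tally p =>
        (PySem.List.pyRange 0 8 1).foldl
          (fun tally i => tally.insert (pvKey p i) (tally.getD (pvKey p i) 0 + 1)) tally)
      (PySem.Dict.empty : PySem.Dict (Int × Option Char) Int)
    = (keyList maps).foldl (fun d k => d.insert k (d.getD k 0 + 1)) PySem.Dict.empty := by
  unfold keyList
  generalize PySem.List.enumerate maps = l
  induction l using List.reverseRecOn with
  | nil => simp
  | append_singleton xs x ih =>
    rw [List.foldl_append, List.flatMap_append, List.foldl_append, ih]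
    simp only [List.foldl_cons, List.foldl_nil, List.flatMap_cons, List.flatMap_nil,
      List.append_nil, List.foldl_map]

-- counting the cells NOT matching coloring c: countP mm = length - count k1 - count k2
lemma count_split (l : List (Int × Option Char)) (k1 k2 : Int × Option Char) (hk : k1 ≠ k2) :
    (l.countP (fun k => !(k == k1) && !(k == k2)) : Int)
      = (l.length : Int) - (l.count k1 : Int) - (l.count k2 : Int) := by
  induction l with
  | nil => simp
  | cons x xs ih =>
    simp only [List.countP_cons, List.count_cons, List.length_cons]
    push_cast
    by_cases h1 : x = k1
    · subst h1
      simp [hk] at ih ⊢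
      omega
    · by_cases h2 : x = k2
      · subst h2
        simp [h1] at ih ⊢
        omega
      · simp [h1, h2] at ih ⊢
        omega

lemma keyList_length (maps : List String) :
    ((keyList maps).length : Int) = 8 * (maps.length : Int) := by
  unfold keyList
  rw [List.length_flatMap]
  have hl : (PySem.List.enumerate maps).length = maps.length := by
    simp
  have e : (PySem.List.enumerate maps).map (fun a => ((PySem.List.pyRange 0 8 1).map (pvKey a)).length)
      = (PySem.List.enumerate maps).map (fun _ => 8) := by
    apply List.map_congr_left; intro p _
    rw [List.length_map]; decide
  rw [e, List.map_const', List.sum_replicate, hl, smul_eq_mul]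
  push_cast; ring

-- ===== VERDICT (by name: the statement is the Claim_ definition above) =====
theorem find_minimum_coloring_spec : Claim_equal_find_minimum_coloring := by
  intro maps _ _
  unfold Spec_find_minimum_coloring find_minimum_coloring find_minimum_coloring_alt
  simp only []
  rw [tally_eq maps]
  rw [foldA_eq maps mm1 _ (fun p => countA1_eq p.1 p.2),
    foldA_eq maps mm2 _ (fun p => countA2_eq p.1 p.2)]
  rw [PySem.Dict.getD_foldl_insert_add_one, PySem.Dict.getD_foldl_insert_add_one,
    PySem.Dict.getD_foldl_insert_add_one, PySem.Dict.getD_foldl_insert_add_one]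
  simp only [PySem.Dict.getD_empty]
  have h1 := count_split (keyList maps) ((0 : Int), some 'B') ((1 : Int), some 'W') (by decide)
  have h2 := count_split (keyList maps) ((0 : Int), some 'W') ((1 : Int), some 'B') (by decide)
  unfold mm1; unfold mm2
  rw [h1, h2, keyList_length maps]
  simp only [min_def]
  split_ifs <;> omega
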